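-- pv_equiv track=rewrite | github.com/tudo-aqua/pinaht | pinaht/knowledge/manager.py | filter_string
-- ===== SOURCE A (Python) =====
-- import string
--
-- def filter_string(raw_string):
--     allowed = string.ascii_letters + string.digits + string.punctuation + "\n "
--     raw_string = "".join(char for char in raw_string if char in allowed)
--     raw_string = raw_string.strip(" \n")
--     # Mask HTML special characters
--     raw_string = raw_string.replace("<", "&lt;")
--     raw_string = raw_string.replace(">", "&gt;")
--     raw_string = raw_string.replace("/", "&#47;")
--     raw_string = raw_string.replace("\\", "&#92;")
--     return raw_string
-- ===== SOURCE B (Python) =====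
-- import string
--
-- def filter_string(raw_string):
--     allowed = set(string.ascii_letters + string.digits + string.punctuation + "\n ")
--     mask = {"<": "&lt;", ">": "&gt;", "/": "&#47;", "\\": "&#92;"}
--     out = []
--     for char in raw_string:
--         if char in allowed:
--             out.append(mask.get(char, char))
--     return "".join(out).strip(" \n")
-- ===== Notes on version B (the rewrite author's own statement) =====
-- stated objective: simpler
-- what changed: A's five sequential scans (a filter comprehension plus four .replace passes, with strip in between) are fused into one pass that looks each allowed character up in a replacement table and appends the masked piece, joining and stripping once at the end.
import Mathlib
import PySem

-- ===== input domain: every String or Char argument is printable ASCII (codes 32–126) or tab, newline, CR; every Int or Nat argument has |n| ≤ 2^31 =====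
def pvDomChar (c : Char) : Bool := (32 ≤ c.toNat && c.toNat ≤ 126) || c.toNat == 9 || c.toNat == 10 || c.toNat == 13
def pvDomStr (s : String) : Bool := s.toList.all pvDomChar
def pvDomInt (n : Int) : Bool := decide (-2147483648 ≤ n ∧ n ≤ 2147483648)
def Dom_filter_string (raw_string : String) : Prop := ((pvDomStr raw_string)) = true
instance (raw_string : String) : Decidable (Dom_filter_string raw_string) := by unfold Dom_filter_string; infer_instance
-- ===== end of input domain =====

-- B fuses A's filter comprehension, strip and four .replace passes into a single pass over the
-- string with a replacement table, joining and stripping once at the end (objective: simpler).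

-- ===== PORT A =====
-- string.ascii_letters + string.digits + string.punctuation + "\n "
def pvAllowedChars : List Char :=
  "abcdefghijklmnopqrstuvwxyzABCDEFGHIJKLMNOPQRSTUVWXYZ0123456789!\"#$%&'()*+,-./:;<=>?@[\\]^_`{|}~\n ".toList

def filter_string (raw_string : String) : String :=
  -- "".join(char for char in raw_string if char in allowed)
  let s1 := PySem.Chars.join [] ((raw_string.toList.filter (fun char => pvAllowedChars.contains char)).map (fun c => [c]))
  -- .strip(" \n")
  let s2 := PySem.Chars.stripChars s1 " \n".toList
  -- the four .replace passes, in A's order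
  let s3 := PySem.Chars.replace s2 "<".toList "&lt;".toList
  let s4 := PySem.Chars.replace s3 ">".toList "&gt;".toList
  let s5 := PySem.Chars.replace s4 "/".toList "&#47;".toList
  let s6 := PySem.Chars.replace s5 "\\".toList "&#92;".toList
  String.ofList s6

-- ===== PORT B =====
-- mask = {"<": "&lt;", ">": "&gt;", "/": "&#47;", "\\": "&#92;"}
def pvMask : PySem.Dict Char (List Char) :=
  PySem.Dict.ofList [('<', "&lt;".toList), ('>', "&gt;".toList), ('/', "&#47;".toList), ('\\', "&#92;".toList)]

def filter_string_alt (raw_string : String) : String :=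
  let allowed : PySem.Set Char := PySem.Set.ofList pvAllowedChars
  -- for char in raw_string: if char in allowed: out.append(mask.get(char, char))
  let out : List (List Char) := raw_string.toList.foldl
    (fun acc char => if PySem.Set.contains allowed char then acc ++ [pvMask.getD char [char]] else acc) []
  -- return "".join(out).strip(" \n")
  String.ofList (PySem.Chars.stripChars (PySem.Chars.join [] out) " \n".toList)

-- ===== PRECONDITION & SPEC =====
def Spec_filter_string (raw_string : String) (out : String) : Prop := out = filter_string_alt raw_string
instance (raw_string : String) (out : String) : Decidable (Spec_filter_string raw_string out) := by unfold Spec_filter_string; infer_instance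

-- ===== CLAIM (what is proved, stated in full; the proofs are below) =====
def Claim_equal_filter_string : Prop := ∀ (raw_string : String), Dom_filter_string raw_string → Spec_filter_string raw_string (filter_string raw_string)

-- ===== LEMMAS AND PROOFS =====

-- the combined per-character effect of A's four replace passes
def pvM (c : Char) : List Char :=
  if c = '<' then "&lt;".toList
  else if c = '>' then "&gt;".toList
  else if c = '/' then "&#47;".toList
  else if c = '\\' then "&#92;".toList
  else [c]

theorem go_single (o : Char) (new : List Char) :
    ∀ (fuel : Nat) (l acc : List Char), l.length ≤ fuel →
      PySem.Chars.replace.go [o] new fuel l acc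
      = acc.reverse ++ l.flatMap (fun c => if c = o then new else [c]) := by
  intro fuel
  induction fuel with
  | zero =>
    intro l acc h
    have : l = [] := List.length_eq_zero_iff.mp (Nat.le_zero.mp h)
    subst this
    simp [PySem.Chars.replace.go]
  | succ n ih =>
    intro l acc h
    cases l with
    | nil => simp [PySem.Chars.replace.go]
    | cons c t =>
      rw [PySem.Chars.replace.go]
      by_cases hc : c = o
      · have hp : List.isPrefixOf [o] (c :: t) = true := by simp [List.isPrefixOf, hc]
        simp only [hp, if_pos]
        rw [ih _ _ (by simpa using Nat.le_of_succ_le_succ h)]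
        simp [hc]
      · have hp : List.isPrefixOf [o] (c :: t) = false := by
          simp [List.isPrefixOf]
          exact fun he => absurd he.symm hc
        simp only [hp, Bool.false_eq_true, if_false]
        rw [ih _ _ (by simpa using Nat.le_of_succ_le_succ h)]
        simp [hc]

theorem replace_single (o : Char) (new : List Char) (s : List Char) :
    PySem.Chars.replace s [o] new = s.flatMap (fun c => if c = o then new else [c]) := by
  rw [PySem.Chars.replace]
  simp only [List.isEmpty_cons, if_false, Bool.false_eq_true]
  exact go_single o new s.length s [] (le_refl _)

theorem pipeline_eq_flatMap (s : List Char) :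
    PySem.Chars.replace (PySem.Chars.replace (PySem.Chars.replace (PySem.Chars.replace s "<".toList "&lt;".toList) ">".toList "&gt;".toList) "/".toList "&#47;".toList) "\\".toList "&#92;".toList
    = s.flatMap pvM := by
  have e1 : ("<".toList : List Char) = ['<'] := rfl
  have e2 : (">".toList : List Char) = ['>'] := rfl
  have e3 : ("/".toList : List Char) = ['/'] := rfl
  have e4 : ("\\".toList : List Char) = ['\\'] := rfl
  rw [e1, e2, e3, e4, replace_single, replace_single, replace_single, replace_single]
  rw [List.flatMap_assoc, List.flatMap_assoc, List.flatMap_assoc]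
  refine List.flatMap_congr (fun c _ => ?_)
  by_cases h1 : c = '<'
  · subst h1; decide
  by_cases h2 : c = '>'
  · subst h2; decide
  by_cases h3 : c = '/'
  · subst h3; decide
  by_cases h4 : c = '\\'
  · subst h4; decide
  simp [pvM, h1, h2, h3, h4]

theorem dropWhile_flatMap (p : Char → Bool) (g : Char → List Char)
    (h1 : ∀ c, p c = true → g c = [c])
    (h2 : ∀ c, p c = false → ∃ h t, g c = h :: t ∧ p h = false) :
    ∀ l : List Char, List.dropWhile p (l.flatMap g) = (List.dropWhile p l).flatMap g := by
  intro l
  induction l with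
  | nil => simp
  | cons c t ih =>
    cases hp : p c with
    | true =>
      rw [List.flatMap_cons, h1 c hp]
      simp only [List.singleton_append, List.dropWhile_cons, hp, if_true]
      exact ih
    | false =>
      obtain ⟨h, tl, hg, hph⟩ := h2 c hp
      rw [List.flatMap_cons, hg, List.cons_append]
      simp only [List.dropWhile_cons, hph, hp, Bool.false_eq_true, if_false]
      rw [List.flatMap_cons, hg, List.cons_append]

-- strip(" \n") commutes with the mask: masked pieces start with '&', end with ';',
-- and contain no space/newline; unmasked characters map to themselves
theorem strip_flatMap (l : List Char) :
    PySem.Chars.stripChars (l.flatMap pvM) " \n".toList = (PySem.Chars.stripChars l " \n".toList).flatMap pvM := by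
  have hsp : (" \n".toList : List Char) = [' ', '\n'] := rfl
  set p : Char → Bool := fun c => [' ', '\n'].contains c with hp
  have h1 : ∀ c, p c = true → pvM c = [c] := by
    intro c hc
    simp [hp, List.contains_eq_mem] at hc
    rcases hc with hc | hc <;> subst hc <;> decide
  have h2 : ∀ c, p c = false → ∃ h t, pvM c = h :: t ∧ p h = false := by
    intro c hc
    by_cases e1 : c = '<'
    · subst e1; exact ⟨'&', "lt;".toList, by decide, by decide⟩
    by_cases e2 : c = '>'
    · subst e2; exact ⟨'&', "gt;".toList, by decide, by decide⟩
    by_cases e3 : c = '/'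
    · subst e3; exact ⟨'&', "#47;".toList, by decide, by decide⟩
    by_cases e4 : c = '\\'
    · subst e4; exact ⟨'&', "#92;".toList, by decide, by decide⟩
    exact ⟨c, [], by simp [pvM, e1, e2, e3, e4], hc⟩
  set gR : Char → List Char := fun c => (pvM c).reverse with hgR
  have h1R : ∀ c, p c = true → gR c = [c] := by
    intro c hc; simp [hgR, h1 c hc]
  have h2R : ∀ c, p c = false → ∃ h t, gR c = h :: t ∧ p h = false := by
    intro c hc
    by_cases e1 : c = '<'
    · subst e1; exact ⟨';', "tl&".toList, by decide, by decide⟩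
    by_cases e2 : c = '>'
    · subst e2; exact ⟨';', "tg&".toList, by decide, by decide⟩
    by_cases e3 : c = '/'
    · subst e3; exact ⟨';', "74#&".toList, by decide, by decide⟩
    by_cases e4 : c = '\\'
    · subst e4; exact ⟨';', "29#&".toList, by decide, by decide⟩
    exact ⟨c, [], by simp [hgR, pvM, e1, e2, e3, e4], hc⟩
  have hrev : ∀ m : List Char, (m.flatMap pvM).reverse = m.reverse.flatMap gR := by
    intro m; rw [List.reverse_flatMap]; rfl
  have hrevR : ∀ m : List Char, (m.flatMap gR).reverse = m.reverse.flatMap pvM := by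
    intro m
    rw [List.reverse_flatMap]
    exact List.flatMap_congr (fun c _ => by simp [hgR])
  rw [PySem.Chars.stripChars, PySem.Chars.stripChars]
  simp only [hsp]
  rw [show (fun c => List.contains [' ', '\n'] c) = p from rfl]
  rw [dropWhile_flatMap p pvM h1 h2, hrev, dropWhile_flatMap p gR h1R h2R, hrevR]

theorem mask_getD (c : Char) : pvMask.getD c [c] = pvM c := by
  by_cases e1 : c = '<'
  · subst e1; decide
  by_cases e2 : c = '>'
  · subst e2; decide
  by_cases e3 : c = '/'
  · subst e3; decide
  by_cases e4 : c = '\\'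
  · subst e4; decide
  have hmk : pvMask = PySem.Dict.mk [('<', "&lt;".toList), ('>', "&gt;".toList), ('/', "&#47;".toList), ('\\', "&#92;".toList)] := by decide
  rw [hmk, PySem.Dict.getD_eq_get?_getD]
  rw [PySem.Dict.get?_mk_cons, PySem.Dict.get?_mk_cons, PySem.Dict.get?_mk_cons, PySem.Dict.get?_mk_cons]
  have b1 : (('<' : Char) == c) = false := by simp [Ne.symm e1]
  have b2 : (('>' : Char) == c) = false := by simp [Ne.symm e2]
  have b3 : (('/' : Char) == c) = false := by simp [Ne.symm e3]
  have b4 : (('\\' : Char) == c) = false := by simp [Ne.symm e4]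
  simp only [b1, b2, b3, b4, Bool.false_eq_true, if_false]
  simp [PySem.Dict.get?, pvM, e1, e2, e3, e4]

theorem foldl_mask (P : Char → Bool) (g : Char → List Char) :
    ∀ (s : List Char) (acc : List (List Char)),
      s.foldl (fun acc char => if P char then acc ++ [g char] else acc) acc
      = acc ++ (s.filter P).map g := by
  intro s
  induction s with
  | nil => simp
  | cons c t ih =>
    intro acc
    cases hp : P c with
    | true => simp [List.foldl_cons, hp, ih]
    | false => simp [List.foldl_cons, hp, ih]

theorem join_nil_flatten : ∀ (parts : List (List Char)), PySem.Chars.join [] parts = parts.flatten := by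
  intro parts
  induction parts with
  | nil => simp [PySem.Chars.join, List.intercalate]
  | cons a rest ih =>
    cases rest with
    | nil => simp [PySem.Chars.join, List.intercalate]
    | cons b r =>
      rw [PySem.Chars.join_cons_cons, ih]
      simp

theorem filter_string_main (raw_string : String) : filter_string raw_string = filter_string_alt raw_string := by
  simp only [filter_string, filter_string_alt]
  have hP : (PySem.Set.ofList pvAllowedChars).contains
      = (fun c => pvAllowedChars.contains c) := by
    funext c
    rw [Bool.eq_iff_iff]
    simp [PySem.Set.mem_ofList, List.contains_eq_mem]
  rw [foldl_mask, hP]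
  set fl := raw_string.toList.filter (fun char => pvAllowedChars.contains char) with hfl
  rw [PySem.Chars.join_nil_singletons]
  have hmapg : fl.map (fun char => pvMask.getD char [char]) = fl.map pvM :=
    List.map_congr_left (fun c _ => mask_getD c)
  rw [List.nil_append, hmapg, join_nil_flatten, ← List.flatMap_def]
  rw [pipeline_eq_flatMap, strip_flatMap]

-- ===== VERDICT (by name: the statement is the Claim_ definition above) =====
theorem filter_string_spec : Claim_equal_filter_string := by
  intro raw_string _
  unfold Spec_filter_string
  exact filter_string_main raw_string
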